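-- pv_equiv track=rewrite | github.com/narayanx/advent-of-code | 2023/day_3.py | get_id_number_text
-- ===== SOURCE A (Python) =====
-- def get_id_number_text(text: list[str]) -> list[str]:
--     id_number_text = []
--     running_number_count = 0
--     for line in text:
--         last_was_digit = False
--         id_line = []
--         for char in line:
--             if not char.isdigit():
--                 if last_was_digit:
--                     running_number_count += 1
--                 id_line.append(char)
--                 last_was_digit = False
--             elif char.isdigit():
--                 id_line.append(str(running_number_count))
--                 last_was_digit = True
--             else:
--                 id_line.append(char)
--
--         id_number_text.append(id_line)
--     return id_number_text
-- ===== SOURCE B (Python) =====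
-- def get_id_number_text(text: list[str]) -> list[str]:
--     # Run-based rewrite: scan each line as maximal digit / non-digit runs.
--     result = []
--     count = 0
--     for line in text:
--         pieces = []
--         i, n = 0, len(line)
--         prev_digit = False
--         while i < n:
--             d = line[i].isdigit()
--             j = i
--             while j < n and line[j].isdigit() == d:
--                 j += 1
--             if d:
--                 pieces.extend([str(count)] * (j - i))
--             else:
--                 if prev_digit:
--                     count += 1
--                 pieces.extend(line[i:j])
--             prev_digit = d
--             i = j
--         result.append(pieces)
--     return result
-- ===== Notes on version B (the rewrite author's own statement) =====
-- stated objective: alternative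
-- what changed: B replaces A's per-character state machine (last_was_digit flag updated at every char) with a run-based scan: each line is split into maximal digit/non-digit runs and whole runs are emitted at once, incrementing the running counter once per digit-run that is followed by a non-digit run in the same line.
import Mathlib
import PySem

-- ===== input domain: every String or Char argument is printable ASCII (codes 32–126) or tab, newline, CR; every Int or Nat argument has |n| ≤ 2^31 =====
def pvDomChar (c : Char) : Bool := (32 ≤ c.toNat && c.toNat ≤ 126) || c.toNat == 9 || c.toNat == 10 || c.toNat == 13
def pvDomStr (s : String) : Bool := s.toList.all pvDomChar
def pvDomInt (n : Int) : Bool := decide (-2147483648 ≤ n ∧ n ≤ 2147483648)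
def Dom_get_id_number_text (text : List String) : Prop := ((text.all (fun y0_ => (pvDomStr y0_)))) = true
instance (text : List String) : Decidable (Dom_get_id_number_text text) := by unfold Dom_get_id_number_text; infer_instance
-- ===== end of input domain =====

-- B replaces A's per-character flag machine with a run-based scan over maximal digit/non-digit runs (alternative decomposition, same cost).


-- ===== PORT A =====
-- step of A's inner per-char loop: state = (running_number_count, last_was_digit, id_line)
def aChar (st : Int × Bool × List String) (ch : Char) : Int × Bool × List String :=
  if ¬ PySem.Chars.isdigit ch then
    ((if st.2.1 then st.1 + 1 else st.1), false, st.2.2 ++ [String.ofList [ch]])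
  else if PySem.Chars.isdigit ch then
    (st.1, true, st.2.2 ++ [PySem.Int.toStr st.1])
  else
    (st.1, st.2.1, st.2.2 ++ [String.ofList [ch]])

def get_id_number_text (text : List String) : List (List String) :=
  (text.foldl (fun (st : Int × List (List String)) line =>
    let r := line.toList.foldl aChar (st.1, false, ([] : List String))
    (r.1, st.2 ++ [r.2.2])) (0, [])).2

-- ===== PORT B =====
-- B's inner while loop: one step consumes one maximal digit / non-digit run; returns (new count, pieces)
def bLine (cnt : Int) (prev : Bool) : List Char → Int × List String
  | [] => (cnt, [])
  | c :: rest =>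
    let d := PySem.Chars.isdigit c
    let run := rest.takeWhile (fun x => PySem.Chars.isdigit x == d)
    let rest' := rest.dropWhile (fun x => PySem.Chars.isdigit x == d)
    if d then
      let r := bLine cnt true rest'
      (r.1, List.replicate (run.length + 1) (PySem.Int.toStr cnt) ++ r.2)
    else
      let r := bLine (if prev then cnt + 1 else cnt) false rest'
      (r.1, (c :: run).map (fun ch => String.ofList [ch]) ++ r.2)
  termination_by l => l.length
  decreasing_by
    simp only [List.length_cons]
    exact Nat.lt_succ_of_le (List.length_dropWhile_le _ _)
    simp only [List.length_cons]
    exact Nat.lt_succ_of_le (List.length_dropWhile_le _ _)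

def get_id_number_text_alt (text : List String) : List (List String) :=
  (text.foldl (fun (st : Int × List (List String)) line =>
    let r := bLine st.1 false line.toList
    (r.1, st.2 ++ [r.2])) (0, [])).2

-- ===== PRECONDITION & SPEC =====
def Spec_get_id_number_text (text : List String) (out : List (List String)) : Prop := out = get_id_number_text_alt text
instance (text : List String) (out : List (List String)) : Decidable (Spec_get_id_number_text text out) := by unfold Spec_get_id_number_text; infer_instance

-- ===== CLAIM (what is proved, stated in full; the proofs are below) =====
def Claim_equal_get_id_number_text : Prop := ∀ (text : List String), Dom_get_id_number_text text → Spec_get_id_number_text text (get_id_number_text text)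

-- ===== LEMMAS AND PROOFS =====

theorem bLine_nil (cnt : Int) (prev : Bool) : bLine cnt prev [] = (cnt, []) := by
  rw [bLine]

theorem bLine_cons_digit (cnt : Int) (prev : Bool) (c : Char) (rest : List Char)
    (hc : PySem.Chars.isdigit c = true) :
    bLine cnt prev (c :: rest) =
      ((bLine cnt true (rest.dropWhile (fun x => PySem.Chars.isdigit x == true))).1,
       List.replicate ((rest.takeWhile (fun x => PySem.Chars.isdigit x == true)).length + 1)
           (PySem.Int.toStr cnt)
         ++ (bLine cnt true (rest.dropWhile (fun x => PySem.Chars.isdigit x == true))).2) := by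
  rw [bLine]
  simp only [hc, if_true]

theorem bLine_cons_nondigit (cnt : Int) (prev : Bool) (c : Char) (rest : List Char)
    (hc : PySem.Chars.isdigit c = false) :
    bLine cnt prev (c :: rest) =
      ((bLine (if prev then cnt + 1 else cnt) false (rest.dropWhile (fun x => PySem.Chars.isdigit x == false))).1,
       (c :: rest.takeWhile (fun x => PySem.Chars.isdigit x == false)).map (fun ch => String.ofList [ch])
         ++ (bLine (if prev then cnt + 1 else cnt) false (rest.dropWhile (fun x => PySem.Chars.isdigit x == false))).2) := by
  rw [bLine]
  simp only [hc, Bool.false_eq_true, if_false]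

-- folding A's char step over a run of digits: appends str(cnt) per char, flag ends true
theorem foldl_aChar_digits (run : List Char) (cnt : Int) (acc : List String)
    (h : ∀ c ∈ run, PySem.Chars.isdigit c = true) :
    run.foldl aChar (cnt, true, acc) =
      (cnt, true, acc ++ run.map (fun _ => PySem.Int.toStr cnt)) := by
  induction run generalizing acc with
  | nil => simp
  | cons c rest ih =>
    have hc : PySem.Chars.isdigit c = true := h c (List.mem_cons_self ..)
    simp only [List.foldl_cons, aChar, hc]
    simp only [not_true, if_false, if_true]
    rw [ih _ (fun x hx => h x (List.mem_cons_of_mem _ hx))]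
    simp

-- folding A's char step over a run of non-digits from flag=false: appends the chars, flag stays false
theorem foldl_aChar_nondigits (run : List Char) (cnt : Int) (acc : List String)
    (h : ∀ c ∈ run, PySem.Chars.isdigit c = false) :
    run.foldl aChar (cnt, false, acc) =
      (cnt, false, acc ++ run.map (fun ch => String.ofList [ch])) := by
  induction run generalizing acc with
  | nil => simp
  | cons c rest ih =>
    have hc : PySem.Chars.isdigit c = false := h c (List.mem_cons_self ..)
    simp only [List.foldl_cons, aChar, hc]
    simp only [Bool.false_eq_true, not_false_eq_true, if_true, if_false]
    rw [ih _ (fun x hx => h x (List.mem_cons_of_mem _ hx))]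
    simp

-- main line lemma: A's per-char fold agrees with B's run recursion in count and output
theorem line_eq (n : Nat) : ∀ (l : List Char), l.length ≤ n → ∀ (cnt : Int) (prev : Bool) (acc : List String),
      ((l.foldl aChar (cnt, prev, acc)).1, (l.foldl aChar (cnt, prev, acc)).2.2) =
        ((bLine cnt prev l).1, acc ++ (bLine cnt prev l).2) := by
  induction n with
  | zero =>
    intro l hl cnt prev acc
    have : l = [] := List.length_eq_zero_iff.mp (Nat.le_zero.mp hl)
    subst this
    simp [bLine_nil]
  | succ n ih =>
    intro l hl cnt prev acc
    match l with
    | [] => simp [bLine_nil]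
    | c :: rest =>
      by_cases hc : PySem.Chars.isdigit c = true
      · -- digit run
        have hsplit : rest = rest.takeWhile (fun x => PySem.Chars.isdigit x == true)
            ++ rest.dropWhile (fun x => PySem.Chars.isdigit x == true) :=
          (List.takeWhile_append_dropWhile ..).symm
        have hrun : ∀ x ∈ rest.takeWhile (fun x => PySem.Chars.isdigit x == true),
            PySem.Chars.isdigit x = true := by
          intro x hx
          simpa using List.mem_takeWhile_imp hx
        have hfirst : aChar (cnt, prev, acc) c = (cnt, true, acc ++ [PySem.Int.toStr cnt]) := by
          simp [aChar, hc]
        have hlen : (rest.dropWhile (fun x => PySem.Chars.isdigit x == true)).length ≤ n := by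
          have h1 := List.length_dropWhile_le (fun x => PySem.Chars.isdigit x == true) rest
          simp only [List.length_cons] at hl
          omega
        conv_lhs => rw [List.foldl_cons, hfirst, hsplit]
        rw [List.foldl_append, foldl_aChar_digits _ _ _ hrun]
        rw [ih _ hlen]
        rw [bLine_cons_digit _ _ _ _ hc]
        simp [List.replicate_succ, List.map_const', List.append_assoc]
      · -- non-digit run
        have hc' : PySem.Chars.isdigit c = false := Bool.eq_false_iff.mpr hc
        have hsplit : rest = rest.takeWhile (fun x => PySem.Chars.isdigit x == false)
            ++ rest.dropWhile (fun x => PySem.Chars.isdigit x == false) :=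
          (List.takeWhile_append_dropWhile ..).symm
        have hrun : ∀ x ∈ rest.takeWhile (fun x => PySem.Chars.isdigit x == false),
            PySem.Chars.isdigit x = false := by
          intro x hx
          simpa using List.mem_takeWhile_imp hx
        have hfirst : aChar (cnt, prev, acc) c =
            ((if prev then cnt + 1 else cnt), false, acc ++ [String.ofList [c]]) := by
          simp [aChar, hc']
        have hlen : (rest.dropWhile (fun x => PySem.Chars.isdigit x == false)).length ≤ n := by
          have h1 := List.length_dropWhile_le (fun x => PySem.Chars.isdigit x == false) rest
          simp only [List.length_cons] at hl
          omega
        conv_lhs => rw [List.foldl_cons, hfirst, hsplit]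
        rw [List.foldl_append, foldl_aChar_nondigits _ _ _ hrun]
        rw [ih _ hlen]
        rw [bLine_cons_nondigit _ _ _ _ hc']
        simp [List.append_assoc]

-- the per-line step functions of the two outer folds agree
theorem step_eq (st : Int × List (List String)) (line : String) :
    (let r := line.toList.foldl aChar (st.1, false, ([] : List String)); (r.1, st.2 ++ [r.2.2]))
      = (let r := bLine st.1 false line.toList; (r.1, st.2 ++ [r.2])) := by
  have h := line_eq line.toList.length line.toList le_rfl st.1 false []
  simp only [List.nil_append] at h
  have h1 := congrArg Prod.fst h
  have h2 := congrArg Prod.snd h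
  simp only [] at h1 h2 ⊢
  rw [h1, h2]

-- ===== VERDICT (by name: the statement is the Claim_ definition above) =====
theorem get_id_number_text_spec : Claim_equal_get_id_number_text := by
  intro text _
  unfold Spec_get_id_number_text get_id_number_text get_id_number_text_alt
  have : (fun (st : Int × List (List String)) (line : String) =>
      let r := line.toList.foldl aChar (st.1, false, ([] : List String))
      (r.1, st.2 ++ [r.2.2]))
    = (fun (st : Int × List (List String)) (line : String) =>
      let r := bLine st.1 false line.toList
      (r.1, st.2 ++ [r.2])) := funext fun st => funext fun (line : String) => step_eq st line
  rw [this]
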